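-- pv_equiv track=rewrite | github.com/secure-software-engineering/HeaderGen | scripts/compare_annotations.py | get_high_level_phases
-- ===== SOURCE A (Python) =====
-- phase_groups = {
--     "Library Loading": ["Library Loading"],
--     "Visualization": ["Visualization"],
--     "Others": ["Others"],
--     "Data Preparation": ["Data Preparation", "Data Profiling and Exploratory Data Analysis", "Exploratory Data Analysis" ,"Data Cleaning Filtering" ,"Data Sub-sampling and Train-test Splitting", "Data Loading"],
--     "Feature Engineering": ["Feature Engineering", "Feature Transformation", "Feature Selection"],
--     "Model Building and Training": ["Model Building and Training", "Model Training", "Model Parameter Tuning", "Model Validation and Assembling"]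
-- }
--
-- def get_high_level_phases(read_json):
--     high_level_combine = {}
--     for _k, _v in read_json.items():
--         high_level_combine[_k] = set()
--         for _cat in _v:
--             for _h_cat, h_cat_v in phase_groups.items():
--                 if _cat in h_cat_v:
--                     high_level_combine[_k].add(_h_cat)
--
--     return high_level_combine
-- ===== SOURCE B (Python) =====
-- phase_groups = {
--     "Library Loading": ["Library Loading"],
--     "Visualization": ["Visualization"],
--     "Others": ["Others"],
--     "Data Preparation": ["Data Preparation", "Data Profiling and Exploratory Data Analysis", "Exploratory Data Analysis" ,"Data Cleaning Filtering" ,"Data Sub-sampling and Train-test Splitting", "Data Loading"],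
--     "Feature Engineering": ["Feature Engineering", "Feature Transformation", "Feature Selection"],
--     "Model Building and Training": ["Model Building and Training", "Model Training", "Model Parameter Tuning", "Model Validation and Assembling"]
-- }
--
-- # reverse index: category -> its high-level phase (built once; categories are unique across groups)
-- _REVERSE = {cat: phase for phase, cats in phase_groups.items() for cat in cats}
--
-- def get_high_level_phases(read_json):
--     return {k: {_REVERSE[c] for c in v if c in _REVERSE} for k, v in read_json.items()}
-- ===== Notes on version B (the rewrite author's own statement) =====
-- stated objective: simpler
-- what changed: Replaces the two inner loops (per category, a scan over all phase groups with a membership test in each group's list) by a single lookup in a reverse index dict from category to phase built once, building each key's set with a comprehension instead of in-place dict mutation.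
import Mathlib
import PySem

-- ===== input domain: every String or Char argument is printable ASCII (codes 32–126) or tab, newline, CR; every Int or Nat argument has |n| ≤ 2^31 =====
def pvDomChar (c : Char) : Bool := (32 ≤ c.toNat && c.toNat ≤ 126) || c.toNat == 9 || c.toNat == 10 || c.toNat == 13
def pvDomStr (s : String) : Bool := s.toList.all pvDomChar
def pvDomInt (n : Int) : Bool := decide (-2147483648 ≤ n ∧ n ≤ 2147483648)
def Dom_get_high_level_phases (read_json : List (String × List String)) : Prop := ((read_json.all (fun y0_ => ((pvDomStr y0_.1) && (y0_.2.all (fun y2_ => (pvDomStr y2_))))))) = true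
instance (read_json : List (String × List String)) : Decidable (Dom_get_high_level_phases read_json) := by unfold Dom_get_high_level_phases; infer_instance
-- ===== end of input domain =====

-- B replaces A's inner scan over all phase groups per category by one lookup in a
-- reverse index (category -> phase) built once, building each set directly (simpler).

-- the module-level constant phase_groups (dict -> association list, insertion order)
def phaseGroups : List (String × List String) :=
  [ ("Library Loading", ["Library Loading"]),
    ("Visualization", ["Visualization"]),
    ("Others", ["Others"]),
    ("Data Preparation", ["Data Preparation", "Data Profiling and Exploratory Data Analysis", "Exploratory Data Analysis", "Data Cleaning Filtering", "Data Sub-sampling and Train-test Splitting", "Data Loading"]),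
    ("Feature Engineering", ["Feature Engineering", "Feature Transformation", "Feature Selection"]),
    ("Model Building and Training", ["Model Building and Training", "Model Training", "Model Parameter Tuning", "Model Validation and Assembling"]) ]

-- ===== PORT A =====
-- high_level_combine is a dict String -> set String; the result is its items list.
def get_high_level_phases (read_json : List (String × List String)) : List (String × List String) :=
  (read_json.foldl (fun hlc kv =>
      let hlc := hlc.insert kv.1 PySem.Set.empty        -- high_level_combine[_k] = set()
      kv.2.foldl (fun hlc cat =>
        phaseGroups.foldl (fun hlc hg =>
          if cat ∈ hg.2 then hlc.modify kv.1 PySem.Set.empty (fun s => PySem.Set.add s hg.1)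
          else hlc) hlc) hlc)
    PySem.Dict.empty).items

-- ===== PORT B =====
-- _REVERSE = {cat: phase for phase, cats in phase_groups.items() for cat in cats}
def reverseIndex : PySem.Dict String String :=
  phaseGroups.foldl (fun d hg => hg.2.foldl (fun d cat => d.insert cat hg.1) d) PySem.Dict.empty

-- {k: {_REVERSE[c] for c in v if c in _REVERSE} for k, v in read_json.items()}
def get_high_level_phases_alt (read_json : List (String × List String)) : List (String × List String) :=
  (read_json.foldl (fun hlc kv =>
      hlc.insert kv.1 (kv.2.foldl (fun s c =>
        match reverseIndex.get? c with
        | some h => PySem.Set.add s h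
        | none => s) PySem.Set.empty))
    PySem.Dict.empty).items

-- ===== PRECONDITION & SPEC =====
def Spec_get_high_level_phases (read_json : List (String × List String)) (out : List (String × List String)) : Prop := out = get_high_level_phases_alt read_json
instance (read_json : List (String × List String)) (out : List (String × List String)) : Decidable (Spec_get_high_level_phases read_json out) := by unfold Spec_get_high_level_phases; infer_instance

-- ===== CLAIM (what is proved, stated in full; the proofs are below) =====
def Claim_equal_get_high_level_phases : Prop := ∀ (read_json : List (String × List String)), Dom_get_high_level_phases read_json → Spec_get_high_level_phases read_json (get_high_level_phases read_json)

-- ===== LEMMAS AND PROOFS =====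

-- all category strings occurring in phase_groups, in scan order
def allCats : List String := phaseGroups.flatMap (·.2)

-- modifying the value just inserted at k is inserting the modified value
theorem insert_modify (d : PySem.Dict String (PySem.Set String)) (k : String)
    (s : PySem.Set String) (f : PySem.Set String → PySem.Set String) :
    (d.insert k s).modify k PySem.Set.empty f = d.insert k (f s) := by
  simp [PySem.Dict.modify, PySem.Dict.getD_insert_self, PySem.Dict.insert_insert_self]

-- per category: A's scan over all phase groups performs exactly the single update
-- that B's reverse-index lookup performs
theorem inner_scan_eq (cat : String) (k : String) (d : PySem.Dict String (PySem.Set String)) :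
    phaseGroups.foldl (fun hlc hg =>
        if cat ∈ hg.2 then hlc.modify k PySem.Set.empty (fun s => PySem.Set.add s hg.1)
        else hlc) d
      = match reverseIndex.get? cat with
        | some h => d.modify k PySem.Set.empty (fun s => PySem.Set.add s h)
        | none => d := by
  have hall : allCats = ["Library Loading", "Visualization", "Others",
      "Data Preparation", "Data Profiling and Exploratory Data Analysis", "Exploratory Data Analysis",
      "Data Cleaning Filtering", "Data Sub-sampling and Train-test Splitting", "Data Loading",
      "Feature Engineering", "Feature Transformation", "Feature Selection",
      "Model Building and Training", "Model Training", "Model Parameter Tuning",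
      "Model Validation and Assembling"] := rfl
  by_cases hmem : cat ∈ allCats
  · rw [hall] at hmem
    fin_cases hmem <;> rfl
  · have hnone : reverseIndex.get? cat = none :=
      (PySem.Dict.get?_eq_none_iff_not_mem_keys reverseIndex cat).mpr (by
        have hk : reverseIndex.keys = allCats := by decide
        rw [hk]; exact hmem)
    rw [hnone]
    rw [hall] at hmem
    simp only [List.mem_cons, List.not_mem_nil, or_false, not_or] at hmem
    obtain ⟨h1,h2,h3,h4,h5,h6,h7,h8,h9,h10,h11,h12,h13,h14,h15,h16⟩ := hmem
    simp [phaseGroups, List.foldl, h1,h2,h3,h4,h5,h6,h7,h8,h9,h10,h11,h12,h13,h14,h15,h16]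

-- the whole inner loop over a key's categories, started right after the fresh insert,
-- equals one insert of the set B builds
theorem inner_loop_eq (cats : List String) (k : String)
    (d : PySem.Dict String (PySem.Set String)) (s : PySem.Set String) :
    cats.foldl (fun hlc cat =>
        phaseGroups.foldl (fun hlc hg =>
          if cat ∈ hg.2 then hlc.modify k PySem.Set.empty (fun t => PySem.Set.add t hg.1)
          else hlc) hlc) (d.insert k s)
      = d.insert k (cats.foldl (fun t c =>
          match reverseIndex.get? c with
          | some h => PySem.Set.add t h
          | none => t) s) := by
  induction cats generalizing s with
  | nil => rfl
  | cons c rest ih =>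
      rw [List.foldl_cons, inner_scan_eq]
      cases hc : reverseIndex.get? c with
      | none => simp only [List.foldl_cons, hc]; exact ih s
      | some h => simp only [List.foldl_cons, hc]; rw [insert_modify]; exact ih _

-- outer loop: the two dict-building folds agree from any start
theorem outer_eq (l : List (String × List String)) (d : PySem.Dict String (PySem.Set String)) :
    l.foldl (fun hlc kv =>
        let hlc := hlc.insert kv.1 PySem.Set.empty
        kv.2.foldl (fun hlc cat =>
          phaseGroups.foldl (fun hlc hg =>
            if cat ∈ hg.2 then hlc.modify kv.1 PySem.Set.empty (fun s => PySem.Set.add s hg.1)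
            else hlc) hlc) hlc) d
      = l.foldl (fun hlc kv =>
          hlc.insert kv.1 (kv.2.foldl (fun s c =>
            match reverseIndex.get? c with
            | some h => PySem.Set.add s h
            | none => s) PySem.Set.empty)) d := by
  induction l generalizing d with
  | nil => rfl
  | cons kv rest ih =>
      simp only [List.foldl_cons]
      rw [inner_loop_eq]
      exact ih _

-- ===== VERDICT (by name: the statement is the Claim_ definition above) =====
theorem get_high_level_phases_spec : Claim_equal_get_high_level_phases := by
  intro read_json _
  unfold Spec_get_high_level_phases get_high_level_phases get_high_level_phases_alt
  rw [outer_eq]
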